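-- pv_equiv track=rewrite | github.com/haoside666/DockerfileGen | graphgen/shell_parse/shasta/print_lib.py | fresh_marker
-- ===== SOURCE A (Python) =====
-- def fresh_marker(heredoc):
--     respectsFound = set();
--
--     for line in heredoc.split('\n'):
--         respects = 0;
--
--         if ((len(line) > 2) and (line[0] == 'E') and (line[1] == 'O')):
--             for i in range(2, len(line)):
--                 if (line[i] == 'F'):
--                     respects = i - 2;
--
--             respectsFound.add(respects);
--
--     i = 0;
--     while (True):
--         if (not (i in respectsFound)):
--             return "EOF" + ("F" * i);
--
--         i = i + 1;
-- ===== SOURCE B (Python) =====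
-- def fresh_marker(heredoc):
--     lengths = set()
--     for line in heredoc.split('\n'):
--         if len(line) > 2 and line.startswith("EO"):
--             lengths.add(max(line.rfind("F") - 2, 0))
--     expected = 0
--     for v in sorted(lengths):
--         if v != expected:
--             break
--         expected += 1
--     return "EOF" + "F" * expected
-- ===== Notes on version B (the rewrite author's own statement) =====
-- stated objective: simpler
-- what changed: Per line the hand-written index loop tracking the last 'F' is replaced by a single rfind call, and the open-ended while-loop probing i=0,1,2,... against the set is replaced by one sorted pass over the distinct lengths that walks the expected value (a sort-then-scan mex).
import Mathlib
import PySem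

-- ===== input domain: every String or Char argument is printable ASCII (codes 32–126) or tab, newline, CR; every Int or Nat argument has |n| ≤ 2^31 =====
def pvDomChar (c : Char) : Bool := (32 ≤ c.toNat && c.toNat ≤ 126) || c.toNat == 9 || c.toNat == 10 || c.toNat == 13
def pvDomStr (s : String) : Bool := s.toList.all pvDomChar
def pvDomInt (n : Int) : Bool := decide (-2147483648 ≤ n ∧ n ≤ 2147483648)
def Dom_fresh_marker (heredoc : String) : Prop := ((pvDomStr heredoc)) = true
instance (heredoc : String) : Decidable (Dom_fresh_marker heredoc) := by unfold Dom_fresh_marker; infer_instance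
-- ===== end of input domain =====

-- B replaces the per-line last-'F' index loop by one rfind call and the open-ended
-- membership-probing while-loop by a single scan over the sorted distinct lengths (objective: simpler).

-- ===== PORT A =====

-- termination helpers for A's while-loop (cited by the port's decreasing_by)
theorem pvFilterLenMono (l : List Int) (e : Int) :
    (l.filter (fun x => decide (e < x))).length ≤ (l.filter (fun x => decide (e ≤ x))).length := by
  induction l with
  | nil => simp
  | cons a t ih =>
    by_cases h1 : e < a
    · have h2 : e ≤ a := le_of_lt h1
      simp [h1, h2]; omega
    · by_cases h2 : e ≤ a <;> simp [h1, h2] <;> omega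

theorem pvProbeMeasure (l : List Int) (e : Int) (h : e ∈ l) :
    (l.filter (fun x => decide (e < x))).length < (l.filter (fun x => decide (e ≤ x))).length := by
  induction l with
  | nil => simp at h
  | cons a t ih =>
    rcases List.mem_cons.mp h with rfl | hm
    · have hmono := pvFilterLenMono t e
      simp
      omega
    · have hih := ih hm
      by_cases h1 : e < a
      · have h2 : e ≤ a := le_of_lt h1
        simp [h1, h2]
        omega
      · by_cases h2 : e ≤ a <;> simp [h1, h2] <;> omega

-- the 'while True' loop of A: probe i = 0, 1, 2, … for the first value not in the set
def pvProbeA (s : PySem.Set Int) (i : Int) : String :=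
  if h : i ∈ s then pvProbeA s (i + 1)
  else "EOF" ++ String.ofList (PySem.List.pyRepeat ['F'] i)
termination_by (s.filter (fun x => decide (i ≤ x))).length
decreasing_by
  have h' := pvProbeMeasure s i h
  have he : (fun x => decide (i + 1 ≤ x)) = (fun x => decide (i < x)) := by
    funext x; simp
  rw [he]; exact h'

def fresh_marker (heredoc : String) : String :=
  let respectsFound : PySem.Set Int :=
    ((PySem.Str.split? heredoc "\n").getD []).foldl (fun s line =>
      let respects : Int := 0
      if PySem.Str.len line > 2 ∧ PySem.Str.pyGet? line 0 = some 'E' ∧ PySem.Str.pyGet? line 1 = some 'O' then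
        PySem.Set.add s ((PySem.List.pyRange 2 (PySem.Str.len line) 1).foldl
          (fun r i => if PySem.Str.pyGet? line i = some 'F' then i - 2 else r) respects)
      else s) PySem.Set.empty
  pvProbeA respectsFound 0

-- ===== PORT B =====

-- the 'for v in sorted(lengths)' loop of B: walk the next expected value, break at the first gap
def pvScanB : List Int → Int → Int
  | [], e => e
  | v :: t, e => if v ≠ e then e else pvScanB t (e + 1)

def fresh_marker_alt (heredoc : String) : String :=
  let lengths : PySem.Set Int :=
    ((PySem.Str.split? heredoc "\n").getD []).foldl (fun s line =>
      if PySem.Str.len line > 2 ∧ PySem.Str.startswith line "EO" = true then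
        PySem.Set.add s (max (PySem.Str.rfind line "F" - 2) 0)
      else s) PySem.Set.empty
  let expected := pvScanB (PySem.List.sorted lengths (fun x => x) false) 0
  "EOF" ++ String.ofList (PySem.List.pyRepeat ['F'] expected)

-- ===== PRECONDITION & SPEC =====
def Spec_fresh_marker (heredoc : String) (out : String) : Prop := out = fresh_marker_alt heredoc
instance (heredoc : String) (out : String) : Decidable (Spec_fresh_marker heredoc out) := by unfold Spec_fresh_marker; infer_instance

-- ===== CLAIM (what is proved, stated in full; the proofs are below) =====
def Claim_equal_fresh_marker : Prop := ∀ (heredoc : String), Dom_fresh_marker heredoc → Spec_fresh_marker heredoc (fresh_marker heredoc)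

-- ===== LEMMAS AND PROOFS =====

-- singleton-prefix characterisation
theorem pvPrefF (cs : List Char) (j : Nat) :
    ['F'].isPrefixOf (cs.drop j) = true ↔ cs[j]? = some 'F' := by
  rw [List.isPrefixOf_iff_prefix, ← List.head?_drop]
  cases h : cs.drop j with
  | nil => simp
  | cons c t => simp [List.cons_prefix_cons, eq_comm]

-- under the guard (line starts with 'E','O') rfind.go is -1 or at least 2
theorem pvGoRange (cs : List Char) (hE : cs[0]? = some 'E') (hO : cs[1]? = some 'O') :
    ∀ k : Nat, PySem.Chars.rfind.go cs ['F'] k = -1 ∨ 2 ≤ PySem.Chars.rfind.go cs ['F'] k := by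
  intro k
  induction k with
  | zero =>
    left
    have hp : ¬ (['F'].isPrefixOf (cs.drop 0) = true) := by rw [pvPrefF]; simp [hE]
    simp only [List.drop_zero] at hp
    rw [PySem.Chars.rfind.go, if_neg hp]
  | succ j ih =>
    rw [PySem.Chars.rfind.go]
    by_cases hp : ['F'].isPrefixOf (cs.drop (j + 1)) = true
    · rcases Nat.eq_zero_or_pos j with rfl | hj
      · rw [pvPrefF] at hp; rw [hO] at hp; simp at hp
      · rw [if_pos hp]; right; push_cast; omega
    · rw [if_neg hp]; exact ih

-- A's index loop over range(2, m) equals the downward rfind.go recursion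
theorem pvLoopEqGo (line : String) (hE : line.toList[0]? = some 'E') (hO : line.toList[1]? = some 'O') :
    ∀ m : Nat, 2 ≤ m → m ≤ line.toList.length →
    (PySem.List.pyRange 2 (m : Int) 1).foldl
      (fun r i => if PySem.Str.pyGet? line i = some 'F' then i - 2 else r) 0
    = (if PySem.Chars.rfind.go line.toList ['F'] (m - 1) = -1 then 0
       else PySem.Chars.rfind.go line.toList ['F'] (m - 1) - 2) := by
  intro m hm2
  induction m, hm2 using Nat.le_induction with
  | base =>
    intro _
    have hrange : PySem.List.pyRange 2 ((2 : Nat) : Int) 1 = [] := by decide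
    rw [hrange]
    have h1 : PySem.Chars.rfind.go line.toList ['F'] 1 = -1 := by
      have hp1 : ¬ (['F'].isPrefixOf (line.toList.drop 1) = true) := by rw [pvPrefF]; simp [hO]
      have hp0 : ¬ (['F'].isPrefixOf (line.toList.drop 0) = true) := by rw [pvPrefF]; simp [hE]
      simp only [List.drop_zero] at hp0
      rw [show (1 : Nat) = 0 + 1 from rfl, PySem.Chars.rfind.go, if_neg (by simpa using hp1),
        PySem.Chars.rfind.go, if_neg hp0]
    simp [h1]
  | succ m hm ih =>
    intro hlen
    have hml : m ≤ line.toList.length := by omega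
    have hsplit : PySem.List.pyRange 2 ((m + 1 : Nat) : Int) 1
        = PySem.List.pyRange 2 (m : Int) 1 ++ [(m : Int)] := by
      rw [PySem.List.pyRange_one_append 2 (m : Int) ((m + 1 : Nat) : Int) (by exact_mod_cast hm) (by push_cast; omega)]
      congr 1
      rw [PySem.List.pyRange_one_cons (by push_cast; omega)]
      have : PySem.List.pyRange ((m : Int) + 1) ((m + 1 : Nat) : Int) 1 = [] := by
        apply List.eq_nil_of_length_eq_zero
        rw [PySem.List.length_pyRange_one]
        push_cast; omega
      rw [this]
    rw [hsplit, List.foldl_append]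
    simp only [List.foldl_cons, List.foldl_nil]
    have hget : PySem.Str.pyGet? line ((m : Int)) = line.toList[m]? := by
      simpa using PySem.Str.pyGet?_natCast line m
    obtain ⟨j, rfl⟩ : ∃ j, m = j + 1 := ⟨m - 1, by omega⟩
    have hm1 : (j + 1 + 1) - 1 = j + 1 := by omega
    rw [hm1]
    rw [PySem.Chars.rfind.go]
    by_cases hF : line.toList[j + 1]? = some 'F'
    · have hp : ['F'].isPrefixOf (line.toList.drop (j + 1)) = true := (pvPrefF _ _).mpr hF
      rw [hget, if_pos hF, if_pos hp]
      have : ((j : Int) + 1) ≠ -1 := by omega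
      rw [if_neg (by push_cast; omega)]
    · have hp : ¬ (['F'].isPrefixOf (line.toList.drop (j + 1)) = true) := fun h => hF ((pvPrefF _ _).mp h)
      rw [hget, if_neg hF, if_neg hp]
      have := ih hml
      simpa using this

-- the per-line value: A's scan equals B's max(rfind - 2, 0) under the guard
theorem pvPerLine (line : String) (h3 : 3 ≤ line.toList.length)
    (hE : line.toList[0]? = some 'E') (hO : line.toList[1]? = some 'O') :
    (PySem.List.pyRange 2 (PySem.Str.len line) 1).foldl
      (fun r i => if PySem.Str.pyGet? line i = some 'F' then i - 2 else r) 0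
    = max (PySem.Str.rfind line "F" - 2) 0 := by
  have hlen : PySem.Str.len line = (line.toList.length : Int) := by
    simp [PySem.Str.len]
  have hrf : PySem.Str.rfind line "F"
      = PySem.Chars.rfind.go line.toList ['F'] (line.toList.length - 1) := by
    show PySem.Chars.rfind line.toList "F".toList = _
    rw [PySem.Chars.rfind]
    obtain ⟨k, hk⟩ : ∃ k, line.toList.length = k + 1 := ⟨line.toList.length - 1, by omega⟩
    rw [hk]
    have hp : ¬ (['F'].isPrefixOf (line.toList.drop (k + 1)) = true) := by
      rw [pvPrefF]
      rw [List.getElem?_eq_none (by omega)]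
      simp
    show PySem.Chars.rfind.go line.toList ['F'] (k + 1) = _
    rw [PySem.Chars.rfind.go, if_neg hp]
    simp
  rw [hlen, hrf, pvLoopEqGo line hE hO line.toList.length (by omega) (le_refl _)]
  rcases pvGoRange line.toList hE hO (line.toList.length - 1) with h | h
  · rw [if_pos h, h]; decide
  · rw [if_neg (by omega)]
    omega

-- the guard of A equals the guard of B
theorem pvGuardIff (line : String) :
    (PySem.Str.len line > 2 ∧ PySem.Str.pyGet? line 0 = some 'E' ∧ PySem.Str.pyGet? line 1 = some 'O')
    ↔ (PySem.Str.len line > 2 ∧ PySem.Str.startswith line "EO" = true) := by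
  have hlen : PySem.Str.len line = (line.toList.length : Int) := by simp [PySem.Str.len]
  have h0 : PySem.Str.pyGet? line 0 = line.toList[0]? := by
    simpa using PySem.Str.pyGet?_natCast line 0
  have h1 : PySem.Str.pyGet? line 1 = line.toList[1]? := by
    simpa using PySem.Str.pyGet?_natCast line 1
  have hsw : PySem.Str.startswith line "EO" = true ↔ ['E', 'O'] <+: line.toList := by
    show PySem.Chars.startswith line.toList "EO".toList = true ↔ _
    exact PySem.Chars.startswith_iff _ _
  rw [h0, h1, hsw]
  constructor
  · rintro ⟨hl, hE, hO⟩
    refine ⟨hl, ?_⟩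
    cases hcs : line.toList with
    | nil => simp [hcs] at hE
    | cons a t =>
      cases ht : t with
      | nil => rw [hcs, ht] at hO; simp at hO
      | cons b u =>
        rw [hcs, ht] at hE hO
        simp at hE hO
        simp [List.cons_prefix_cons, hE, hO]
  · rintro ⟨hl, hp⟩
    refine ⟨hl, ?_⟩
    rcases hp with ⟨u, hu⟩
    rw [← hu]
    simp

-- the two foldls build the same set
theorem pvSetsEq (lines : List String) : ∀ s : PySem.Set Int,
    lines.foldl (fun s line =>
      let respects : Int := 0
      if PySem.Str.len line > 2 ∧ PySem.Str.pyGet? line 0 = some 'E' ∧ PySem.Str.pyGet? line 1 = some 'O' then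
        PySem.Set.add s ((PySem.List.pyRange 2 (PySem.Str.len line) 1).foldl
          (fun r i => if PySem.Str.pyGet? line i = some 'F' then i - 2 else r) respects)
      else s) s
    = lines.foldl (fun s line =>
      if PySem.Str.len line > 2 ∧ PySem.Str.startswith line "EO" = true then
        PySem.Set.add s (max (PySem.Str.rfind line "F" - 2) 0)
      else s) s := by
  induction lines with
  | nil => intro s; rfl
  | cons line rest ih =>
    intro s
    simp only [List.foldl_cons]
    have hstep : (let respects : Int := 0
        if PySem.Str.len line > 2 ∧ PySem.Str.pyGet? line 0 = some 'E' ∧ PySem.Str.pyGet? line 1 = some 'O' then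
          PySem.Set.add s ((PySem.List.pyRange 2 (PySem.Str.len line) 1).foldl
            (fun r i => if PySem.Str.pyGet? line i = some 'F' then i - 2 else r) respects)
        else s)
        = (if PySem.Str.len line > 2 ∧ PySem.Str.startswith line "EO" = true then
            PySem.Set.add s (max (PySem.Str.rfind line "F" - 2) 0)
          else s) := by
      show (if PySem.Str.len line > 2 ∧ PySem.Str.pyGet? line 0 = some 'E' ∧ PySem.Str.pyGet? line 1 = some 'O' then
          PySem.Set.add s ((PySem.List.pyRange 2 (PySem.Str.len line) 1).foldl
            (fun r i => if PySem.Str.pyGet? line i = some 'F' then i - 2 else r) 0)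
        else s) = _
      by_cases hg : PySem.Str.len line > 2 ∧ PySem.Str.pyGet? line 0 = some 'E' ∧ PySem.Str.pyGet? line 1 = some 'O'
      · rw [if_pos hg, if_pos ((pvGuardIff line).mp hg)]
        obtain ⟨hl, hE, hO⟩ := hg
        have h3 : 3 ≤ line.toList.length := by
          have : PySem.Str.len line = (line.toList.length : Int) := by simp [PySem.Str.len]
          omega
        have hE' : line.toList[0]? = some 'E' := by
          rw [← hE]; symm; simpa using PySem.Str.pyGet?_natCast line 0
        have hO' : line.toList[1]? = some 'O' := by
          rw [← hO]; symm; simpa using PySem.Str.pyGet?_natCast line 1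
        rw [pvPerLine line h3 hE' hO']
      · rw [if_neg hg, if_neg (fun h => hg ((pvGuardIff line).mpr h))]
    rw [hstep, ih]

-- elements of the built set are nonnegative, and the set is duplicate-free
theorem pvSetProps (lines : List String) : ∀ s : PySem.Set Int,
    s.Nodup → (∀ x ∈ s, (0 : Int) ≤ x) →
    (lines.foldl (fun s line =>
      if PySem.Str.len line > 2 ∧ PySem.Str.startswith line "EO" = true then
        PySem.Set.add s (max (PySem.Str.rfind line "F" - 2) 0)
      else s) s).Nodup
    ∧ ∀ x ∈ (lines.foldl (fun s line =>
      if PySem.Str.len line > 2 ∧ PySem.Str.startswith line "EO" = true then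
        PySem.Set.add s (max (PySem.Str.rfind line "F" - 2) 0)
      else s) s), (0 : Int) ≤ x := by
  induction lines with
  | nil => intro s h1 h2; exact ⟨h1, h2⟩
  | cons line rest ih =>
    intro s h1 h2
    simp only [List.foldl_cons]
    by_cases hg : PySem.Str.len line > 2 ∧ PySem.Str.startswith line "EO" = true
    · rw [if_pos hg]
      apply ih
      · exact PySem.Set.nodup_add s _ h1
      · intro x hx
        rcases (PySem.Set.mem_add s _ x).mp hx with hx' | rfl
        · exact h2 x hx'
        · exact le_max_right _ _
    · rw [if_neg hg]; exact ih s h1 h2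

-- probing the set upward from e equals scanning its sorted elements ≥ e
theorem pvMex : ∀ (t : List Int), t.Pairwise (· < ·) → ∀ (e : Int) (l : List Int),
    (∀ x : Int, (x ∈ l ∧ e ≤ x) ↔ x ∈ t) →
    pvProbeA l e = "EOF" ++ String.ofList (PySem.List.pyRepeat ['F'] (pvScanB t e)) := by
  intro t
  induction t with
  | nil =>
    intro _ e l hc
    have he : e ∉ l := fun hmem => by simpa using (hc e).mp ⟨hmem, le_refl e⟩
    rw [pvProbeA, dif_neg he]
    rfl
  | cons v t ih =>
    intro hp e l hc
    have hvt : ∀ x ∈ t, v < x := (List.pairwise_cons.mp hp).1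
    have hp' : t.Pairwise (· < ·) := (List.pairwise_cons.mp hp).2
    have hv : v ∈ l ∧ e ≤ v := (hc v).mpr (List.mem_cons_self)
    by_cases hve : v = e
    · subst hve
      rw [pvProbeA, dif_pos hv.1]
      have hscan : pvScanB (v :: t) v = pvScanB t (v + 1) := by simp [pvScanB]
      rw [hscan]
      apply ih hp' (v + 1) l
      intro x
      constructor
      · rintro ⟨hxl, hxe⟩
        have hx : x ∈ v :: t := (hc x).mp ⟨hxl, by omega⟩
        rcases List.mem_cons.mp hx with rfl | hxt
        · omega
        · exact hxt
      · intro hxt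
        have hx := (hc x).mpr (List.mem_cons_of_mem v hxt)
        exact ⟨hx.1, by have := hvt x hxt; omega⟩
    · have hlt : e < v := lt_of_le_of_ne hv.2 (Ne.symm hve)
      have he : e ∉ l := by
        intro hmem
        rcases List.mem_cons.mp ((hc e).mp ⟨hmem, le_refl e⟩) with h | h
        · exact hve h.symm
        · have := hvt e h; omega
      rw [pvProbeA, dif_neg he]
      have hscan : pvScanB (v :: t) e = e := by simp [pvScanB, hve]
      rw [hscan]

-- ===== VERDICT (by name: the statement is the Claim_ definition above) =====
theorem fresh_marker_spec : Claim_equal_fresh_marker := by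
  intro heredoc _
  unfold Spec_fresh_marker fresh_marker fresh_marker_alt
  rw [pvSetsEq]
  set S := ((PySem.Str.split? heredoc "\n").getD []).foldl (fun s line =>
      if PySem.Str.len line > 2 ∧ PySem.Str.startswith line "EO" = true then
        PySem.Set.add s (max (PySem.Str.rfind line "F" - 2) 0)
      else s) PySem.Set.empty with hS
  obtain ⟨hnd, hnn⟩ := pvSetProps ((PySem.Str.split? heredoc "\n").getD []) PySem.Set.empty
    (by simp [PySem.Set.empty]) (by simp [PySem.Set.empty])
  rw [← hS] at hnd hnn
  have hperm := PySem.List.sorted_perm S (fun x => x) false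
  have hle := PySem.List.sorted_pairwise S (fun x => x)
  have hnds : (PySem.List.sorted S (fun x => x) false).Nodup := hperm.symm.nodup hnd
  have hlt : (PySem.List.sorted S (fun x => x) false).Pairwise (· < ·) := by
    have := hle.and hnds
    exact this.imp (fun h => lt_of_le_of_ne h.1 h.2)
  apply pvMex _ hlt 0 S
  intro x
  constructor
  · rintro ⟨hxl, _⟩
    exact (PySem.List.mem_sorted S (fun x => x) false x).mpr hxl
  · intro hx
    have hxl := (PySem.List.mem_sorted S (fun x => x) false x).mp hx
    exact ⟨hxl, hnn x hxl⟩
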